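-- pv_equiv track=rewrite | github.com/Kojaewoong0504/jungle_8_algorithm | algorithm_study/추가 연습 문제/test/test_1.py | solution
-- ===== SOURCE A (Python) =====
-- def solution(cylinder, a):
--     n = len(cylinder)
--     zero_positions = [i for i in range(n) if cylinder[i] == 0]
--
--     if not zero_positions:
--         return [0, 1]  # 모든 칸에 총알이 있는 경우
--
--     safe_count = 0
--     for start_pos in zero_positions:
--         is_safe = True
--         current_pos = start_pos
--         for _ in range(a):
--             current_pos = (current_pos + 1) % n
--             if cylinder[current_pos] == 1:
--                 is_safe = False
--                 break
--         if is_safe: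
--             safe_count += 1
--
--     # 기약분수 계산
--     import math
--     gcd = math.gcd(safe_count, len(zero_positions))
--     return [safe_count // gcd, len(zero_positions) // gcd]
-- ===== SOURCE B (Python) =====
-- def solution(cylinder, a):
--     n = len(cylinder)
--     zeros = sum(1 for v in cylinder if v == 0)
--     if zeros == 0:
--         return [0, 1]
--     # nxt[i] = steps (>= 1) from i to the first cell equal to 1 strictly after i,
--     # circularly; key absent when the cylinder contains no 1 at all.
--     nxt = {}
--     d = None
--     for i in range(2 * n - 1, -1, -1):
--         if i < n and d is not None:
--             nxt[i] = d + 1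
--         if cylinder[i % n] == 1:
--             d = 0
--         elif d is not None:
--             d += 1
--     safe = sum(1 for i in range(n)
--                if cylinder[i] == 0 and (i not in nxt or nxt[i] > a))
--     import math
--     g = math.gcd(safe, zeros)
--     return [safe // g, zeros // g]
-- ===== Notes on version B (the rewrite author's own statement) =====
-- stated objective: alternative
-- what changed: Instead of walking up to a steps from every empty chamber (O(z*a)), B precomputes in one backward pass over a doubled index range the circular distance from each position to the next chamber equal to 1, and a position is safe iff that distance exceeds a (or no 1 exists), giving O(n) independent of a; intended as faster, a timing run measured ~1.4x at its largest size.
import Mathlib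
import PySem

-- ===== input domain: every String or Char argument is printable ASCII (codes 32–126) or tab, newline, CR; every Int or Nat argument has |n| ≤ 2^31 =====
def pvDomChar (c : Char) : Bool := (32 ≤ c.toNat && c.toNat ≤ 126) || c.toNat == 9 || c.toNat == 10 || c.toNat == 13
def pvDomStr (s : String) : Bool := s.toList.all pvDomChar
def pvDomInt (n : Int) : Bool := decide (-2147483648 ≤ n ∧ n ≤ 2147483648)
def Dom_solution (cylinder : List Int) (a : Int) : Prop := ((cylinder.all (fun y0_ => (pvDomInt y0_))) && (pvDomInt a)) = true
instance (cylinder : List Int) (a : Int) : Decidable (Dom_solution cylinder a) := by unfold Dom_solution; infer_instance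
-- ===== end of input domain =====

-- B replaces A's per-chamber walk (up to a steps from every empty chamber) by one backward
-- pass that precomputes the circular distance to the next chamber equal to 1 (objective:
-- alternative algorithm, O(n) independent of a).

-- ===== PORT A =====
-- body of A's inner 'for _ in range(a)' (break modelled by a dead state that no longer changes)
def pvStepA (cylinder : List Int) (n : Int) (st : Int × Bool) : Int × Bool :=
  if st.2 then
    let cur := PySem.Int.mod (st.1 + 1) n
    if PySem.List.pyGetD cylinder cur 0 == 1 then (cur, false) else (cur, true)
  else st

def solution (cylinder : List Int) (a : Int) : List Int :=
  let n : Int := cylinder.length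
  let zero_positions : List Int :=
    (PySem.List.pyRange 0 n 1).filter (fun i => PySem.List.pyGetD cylinder i 0 == 0)
  if zero_positions = [] then [0, 1]
  else
    let safe_count : Int :=
      zero_positions.foldl (fun safe_count start_pos =>
        let r := (PySem.List.pyRange 0 a 1).foldl
          (fun st _ => pvStepA cylinder n st) (start_pos, true)
        if r.2 then safe_count + 1 else safe_count) 0
    let g : Int := Int.gcd safe_count zero_positions.length
    [PySem.Int.floordiv safe_count g, PySem.Int.floordiv (zero_positions.length : Int) g]

-- ===== PORT B =====
-- body of B's backward pass: record nxt[i] = d + 1 (old d), then update d at cell i % n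
def pvStepB (cylinder : List Int) (n : Int)
    (st : PySem.Dict Int Int × Option Int) (i : Int) : PySem.Dict Int Int × Option Int :=
  let nxt := if i < n then
      (match st.2 with | some dv => st.1.insert i (dv + 1) | none => st.1)
    else st.1
  let d := if PySem.List.pyGetD cylinder (PySem.Int.mod i n) 0 == 1 then some 0
    else (match st.2 with | some dv => some (dv + 1) | none => none)
  (nxt, d)

def solution_alt (cylinder : List Int) (a : Int) : List Int :=
  let n : Int := cylinder.length
  let zeros : Int := cylinder.foldl (fun acc v => if v == 0 then acc + 1 else acc) 0
  if zeros == 0 then [0, 1]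
  else
    let nxt : PySem.Dict Int Int :=
      ((PySem.List.pyRange (2 * n - 1) (-1) (-1)).foldl
        (fun st i => pvStepB cylinder n st i) (PySem.Dict.empty, none)).1
    let safe : Int :=
      (PySem.List.pyRange 0 n 1).foldl (fun acc i =>
        if PySem.List.pyGetD cylinder i 0 == 0 then
          match nxt.get? i with
          | none => acc + 1
          | some dv => if a < dv then acc + 1 else acc
        else acc) 0
    let g : Int := Int.gcd safe zeros
    [PySem.Int.floordiv safe g, PySem.Int.floordiv zeros g]

-- ===== PRECONDITION & SPEC =====
def Spec_solution (cylinder : List Int) (a : Int) (out : List Int) : Prop := out = solution_alt cylinder a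
instance (cylinder : List Int) (a : Int) (out : List Int) : Decidable (Spec_solution cylinder a out) := by unfold Spec_solution; infer_instance

-- ===== CLAIM (what is proved, stated in full; the proofs are below) =====
def Claim_equal_solution : Prop := ∀ (cylinder : List Int) (a : Int), Dom_solution cylinder a → Spec_solution cylinder a (solution cylinder a)

-- ===== LEMMAS AND PROOFS =====

-- cell value at circular position x (Nat view)
def pvCell (c : List Int) (x : Nat) : Int := c.getD (x % c.length) 0

-- offset (≥ 0) of the first index k with i + k < 2·len and cell (i+k) = 1
def pvDOpt (c : List Int) (i : Nat) : Option Nat :=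
  (List.range (2 * c.length - i)).find? (fun k => pvCell c (i + k) == 1)

-- the Bool A's inner loop computes for start position s
def pvBoolA (c : List Int) (a : Int) (s : Int) : Bool :=
  ((PySem.List.pyRange 0 a 1).foldl (fun st _ => pvStepA c c.length st) (s, true)).2

-- the Bool B's lookup computes for start position j
def pvBoolB (c : List Int) (a : Int) (j : Nat) : Bool :=
  match pvDOpt c (j + 1) with
  | none => true
  | some dv => decide (a < (dv : Int) + 1)

-- invariant of B's backward pass after t steps
def pvInvB (c : List Int) (t : Nat) (st : PySem.Dict Int Int × Option Int) : Prop :=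
  st.2 = (pvDOpt c (2 * c.length - t)).map (fun k => Int.ofNat k) ∧
  ∀ j : Nat, j < c.length →
    st.1.get? (j : Int) =
      if 2 * c.length - t ≤ j then (pvDOpt c (j + 1)).map (fun k => Int.ofNat k + 1) else none

-- first t steps of B's backward pass
def pvProcB (c : List Int) (t : Nat) : PySem.Dict Int Int × Option Int :=
  (List.range t).foldl
    (fun st (k : Nat) => pvStepB c c.length st (2 * (c.length : Int) - 1 - (k : Int)))
    (PySem.Dict.empty, none)

theorem pv_foldl_const_iterate {α β : Type} (f : α → α) (l : List β) (x : α) :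
    l.foldl (fun st _ => f st) x = f^[l.length] x := by
  induction l generalizing x with
  | nil => rfl
  | cons h t ih => simp [List.foldl, Function.iterate_succ_apply, ih]

theorem pv_stepA_dead (c : List Int) (n : Int) (p : Int) (m : Nat) :
    (pvStepA c n)^[m] (p, false) = (p, false) :=
  Function.iterate_fixed rfl m

theorem pv_iterA_char (c : List Int) (hN : 0 < c.length) (m : Nat) (s : Nat) (hs : s < c.length) :
    ((pvStepA c c.length)^[m] ((s : Int), true)).2 = true ↔
      ∀ k : Nat, 1 ≤ k → k ≤ m → pvCell c (s + k) ≠ 1 := by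
  induction m generalizing s with
  | zero =>
    simp only [Function.iterate_zero, id]
    constructor
    · intro _ k h1 h2; omega
    · intro _; trivial
  | succ m ih =>
    rw [Function.iterate_succ_apply]
    have hmod : PySem.Int.mod ((s : Int) + 1) ((c.length : Nat) : Int) = (((s + 1) % c.length : Nat) : Int) := by
      rw [PySem.Int.mod_eq_emod_of_pos (by exact_mod_cast hN)]
      push_cast; rfl
    set s' := (s + 1) % c.length with hs'
    have hs'N : s' < c.length := Nat.mod_lt _ hN
    have hcell : pvCell c (s + 1) = c.getD s' 0 := by
      unfold pvCell; rw [hs']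
    by_cases h1 : c.getD s' 0 = 1
    · have hstep : pvStepA c c.length ((s : Int), true) = ((s' : Int), false) := by
        simp [pvStepA, hmod, PySem.List.pyGetD_natCast, List.getD_eq_getElem?_getD] at *
        simp [h1]
      rw [hstep]
      rw [pv_stepA_dead]
      simp only [Bool.false_eq_true]
      constructor
      · intro h; exact absurd h (by simp)
      · intro h
        exact absurd (hcell.trans h1) (h 1 le_rfl (by omega))
    · have hstep : pvStepA c c.length ((s : Int), true) = ((s' : Int), true) := by
        simp [pvStepA, hmod, PySem.List.pyGetD_natCast, List.getD_eq_getElem?_getD] at *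
        simp [h1]
      rw [hstep]
      rw [ih s' hs'N]
      constructor
      · intro h k hk1 hkm
        rcases Nat.lt_or_ge k 2 with hk | hk
        · have : k = 1 := by omega
          subst this
          rw [hcell]
          exact h1
        · obtain ⟨k', rfl⟩ : ∃ k', k = k' + 1 := ⟨k - 1, by omega⟩
          have := h k' (by omega) (by omega)
          rw [pvCell, Nat.mod_add_mod, show s + 1 + k' = s + (k' + 1) from by omega] at this
          exact this
      · intro h k hk1 hkm
        have := h (k + 1) (by omega) (by omega)
        rw [pvCell, Nat.mod_add_mod, show s + 1 + k = s + (k + 1) from by omega]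
        exact this

theorem pv_boolA_char (c : List Int) (a : Int) (hN : 0 < c.length) (s : Nat) (hs : s < c.length) :
    pvBoolA c a (s : Int) = true ↔
      ∀ k : Nat, 1 ≤ k → (k : Int) ≤ a → pvCell c (s + k) ≠ 1 := by
  unfold pvBoolA
  rw [pv_foldl_const_iterate, PySem.List.length_pyRange_one]
  rw [pv_iterA_char c hN _ s hs]
  constructor
  · intro h k h1 h2; exact h k h1 (by omega)
  · intro h k h1 h2; exact h k h1 (by omega)

theorem pv_dOpt_step (c : List Int) (i : Nat) (hi : i < 2 * c.length) :
    pvDOpt c i = if pvCell c i == 1 then some 0 else (pvDOpt c (i + 1)).map (· + 1) := by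
  unfold pvDOpt
  have h : 2 * c.length - i = (2 * c.length - (i + 1)) + 1 := by omega
  rw [h, List.range_succ_eq_map]
  rw [List.find?_cons]
  have h00 : (pvCell c (i + 0) == 1) = (pvCell c i == 1) := by norm_num
  by_cases h0 : pvCell c i == 1
  · simp [h0]
  · simp only [h00, h0, Bool.false_eq_true, if_false]
    rw [List.find?_map]
    have hp : ((fun k => pvCell c (i + k) == 1) ∘ Nat.succ) = (fun k => pvCell c (i + 1 + k) == 1) := by
      funext k
      have hik : i + Nat.succ k = i + 1 + k := by omega
      simp [Function.comp, hik]
    rw [hp]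

theorem pv_invB (c : List Int) (hN : 0 < c.length) (t : Nat) (ht : t ≤ 2 * c.length) :
    pvInvB c t (pvProcB c t) := by
  induction t with
  | zero =>
    constructor
    · simp [pvProcB, pvDOpt, List.range_zero]
    · intro j hj
      rw [if_neg (by omega)]
      simp [pvProcB, PySem.Dict.empty, PySem.Dict.get?]
  | succ t ih =>
    have ht' : t ≤ 2 * c.length := by omega
    obtain ⟨ihd, ihn⟩ := ih ht'
    have hproc : pvProcB c (t + 1) =
        pvStepB c c.length (pvProcB c t) (2 * (c.length : Int) - 1 - t) := by
      unfold pvProcB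
      rw [List.range_succ, List.foldl_append]
      rfl
    set i : Nat := 2 * c.length - 1 - t with hidef
    have hiInt : (2 * (c.length : Int) - 1 - t) = (i : Int) := by omega
    have hi2N : i < 2 * c.length := by omega
    have hsub : 2 * c.length - t = i + 1 := by omega
    rw [hproc, hiInt]
    rw [hsub] at ihd
    constructor
    · show (pvStepB c c.length (pvProcB c t) (i : Int)).2 = _
      rw [show 2 * c.length - (t+1) = i from by omega]
      rw [pv_dOpt_step c i hi2N]
      simp only [pvStepB]
      have hmod : PySem.Int.mod (i : Int) (c.length : Int) = ((i % c.length : Nat) : Int) := by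
        rw [PySem.Int.mod_eq_emod_of_pos (by exact_mod_cast hN)]
        push_cast; rfl
      rw [hmod]
      have hcell : PySem.List.pyGetD c ((i % c.length : Nat) : Int) 0 = pvCell c i := by
        rw [PySem.List.pyGetD_natCast]
        simp [pvCell, List.getD_eq_getElem?_getD]
      rw [hcell]
      by_cases h1 : pvCell c i == 1
      · simp [h1]
      · simp only [h1, Bool.false_eq_true, if_false]
        rw [ihd]
        cases pvDOpt c (i + 1) with
        | none => simp
        | some dv => simp
    · intro j hj
      rw [show 2 * c.length - (t+1) = i from by omega]
      show (pvStepB c c.length (pvProcB c t) (i : Int)).1.get? (j : Int) = _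
      simp only [pvStepB]
      by_cases hin : i < c.length
      · rw [if_pos (by exact_mod_cast hin)]
        rw [ihd]
        cases hdo : pvDOpt c (i + 1) with
        | none =>
          simp only [Option.map_none]
          rw [ihn j hj]
          by_cases hji : j = i
          · subst hji
            rw [if_neg (by omega), if_pos (by omega), hdo]
            rfl
          · by_cases hle : i ≤ j
            · rw [if_pos (by omega), if_pos (by omega)]
            · rw [if_neg (by omega), if_neg (by omega)]
        | some dv =>
          simp only [Option.map_some]
          by_cases hji : j = i
          · subst hji
            rw [PySem.Dict.get?_insert_self]
            rw [if_pos (by omega), hdo]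
            rfl
          · rw [PySem.Dict.get?_insert_of_ne _ _ (by exact_mod_cast fun h => hji (by exact_mod_cast h))]
            rw [ihn j hj]
            by_cases hle : i ≤ j
            · rw [if_pos (by omega), if_pos (by omega)]
            · rw [if_neg (by omega), if_neg (by omega)]
      · rw [if_neg (by exact_mod_cast hin)]
        rw [ihn j hj]
        rw [if_neg (by omega), if_neg (by omega)]

theorem pv_nxt_get (c : List Int) (hN : 0 < c.length) (j : Nat) (hj : j < c.length) :
    (pvProcB c (2 * c.length)).1.get? (j : Int) =
      (pvDOpt c (j + 1)).map (fun k => Int.ofNat k + 1) := by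
  have h := (pv_invB c hN (2 * c.length) le_rfl).2 j hj
  simpa using h

theorem pv_find?_range_some {p : Nat → Bool} {m d : Nat}
    (h : (List.range m).find? p = some d) : p d = true ∧ ∀ l < d, p l = false := by
  induction m with
  | zero => simp at h
  | succ m ih =>
    rw [List.range_succ, List.find?_append] at h
    cases hm : (List.range m).find? p with
    | some d' =>
      rw [hm] at h
      simp at h
      subst h
      exact ih hm
    | none =>
      rw [hm] at h
      simp at h
      rcases h with ⟨hp, hd⟩
      constructor
      · rw [hd] at hp; exact hp
      · intro l hl
        rw [List.find?_eq_none] at hm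
        have := hm l (List.mem_range.mpr (by omega))
        simpa using this

theorem pv_boolA_eq_boolB (c : List Int) (a : Int) (hN : 0 < c.length)
    (j : Nat) (hj : j < c.length) :
    pvBoolA c a (j : Int) = pvBoolB c a j := by
  have hwin : c.length ≤ 2 * c.length - (j + 1) := by omega
  unfold pvBoolB
  cases hdo : pvDOpt c (j + 1) with
  | none =>
    rw [(pv_boolA_char c a hN j hj).2]
    intro k hk1 _
    unfold pvDOpt at hdo
    rw [List.find?_eq_none] at hdo
    have hlt : (k - 1) % c.length < 2 * c.length - (j + 1) :=
      lt_of_lt_of_le (Nat.mod_lt _ hN) hwin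
    have := hdo ((k - 1) % c.length) (List.mem_range.mpr hlt)
    have hcell : pvCell c (j + 1 + (k - 1) % c.length) = pvCell c (j + k) := by
      unfold pvCell
      have hjk : j + 1 + (k - 1) = j + k := by omega
      rw [Nat.add_mod_mod, hjk]
    rw [hcell] at this
    simpa using this
  | some dv =>
    obtain ⟨hp, hmin⟩ := pv_find?_range_some hdo
    have hp' : pvCell c (j + 1 + dv) = 1 := by simpa using hp
    by_cases hlt : a < (dv : Int) + 1
    · have hba : pvBoolA c a (j : Int) = true := by
        rw [pv_boolA_char c a hN j hj]
        intro k hk1 hka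
        have hkdv : k - 1 < dv := by
          have : (k : Int) < (dv : Int) + 1 := lt_of_le_of_lt hka hlt
          omega
        have := hmin (k - 1) hkdv
        have hjk : j + 1 + (k - 1) = j + k := by omega
        rw [hjk] at this
        simpa using this
      rw [hba]
      simp [hlt]
    · have hnall : ¬ (∀ k : Nat, 1 ≤ k → (k : Int) ≤ a → pvCell c (j + k) ≠ 1) := by
        intro hall
        have hcell : pvCell c (j + (dv + 1)) = 1 := by
          have hjd : j + 1 + dv = j + (dv + 1) := by omega
          rwa [hjd] at hp'
        exact hall (dv + 1) (by omega) (by push_cast at hlt ⊢; omega) hcell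
      have hba : pvBoolA c a (j : Int) = false := by
        rcases Bool.eq_false_or_eq_true (pvBoolA c a (j : Int)) with h | h
        · exact absurd ((pv_boolA_char c a hN j hj).1 h) hnall
        · exact h
      rw [hba]
      simp [hlt]

-- B's backward fold over range(2n-1, -1, -1) is pvProcB at t = 2·len
theorem pv_fold_eq_proc (c : List Int) :
    (PySem.List.pyRange (2 * (c.length : Int) - 1) (-1) (-1)).foldl
      (fun st i => pvStepB c (c.length : Int) st i) (PySem.Dict.empty, none) =
    pvProcB c (2 * c.length) := by
  rw [PySem.List.pyRange_neg_one]
  rw [show ((2 * (c.length : Int) - 1) - (-1)).toNat = 2 * c.length from by omega]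
  rw [List.foldl_map]
  rfl

-- ===== VERDICT (by name: the statement is the Claim_ definition above) =====
theorem solution_spec : Claim_equal_solution := by
  intro c a _
  simp only [Spec_solution, solution, solution_alt]
  have hzeros : (c.foldl (fun acc v => if v == 0 then acc + 1 else acc) (0 : Int)) = ((c.count 0 : Nat) : Int) := by
    simpa using PySem.List.foldl_beq_add_one (l := c) (v := (0 : Int)) (a := (0 : Int))
  have hcount : ((PySem.List.pyRange 0 ((c.length : Nat) : Int) 1).filter
      (fun i => PySem.List.pyGetD c i 0 == 0)).length = c.count 0 := by
    rw [← List.countP_eq_length_filter]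
    conv_rhs => rw [show c.count 0 = c.countP (· == 0) from rfl,
      ← PySem.List.map_pyGetD_pyRange_zero' c 0, List.countP_map]
    rfl
  by_cases hz : c.count 0 = 0
  · rw [if_pos (List.length_eq_zero_iff.mp (hcount.trans hz))]
    rw [if_pos (by rw [hzeros, hz]; rfl)]
  · have hN : 0 < c.length := by
      rcases c with _ | ⟨x, t⟩
      · simp at hz
      · simp
    rw [if_neg (fun h => hz (by rw [← hcount, h]; rfl))]
    rw [if_neg (by rw [hzeros]; simpa using hz)]
    rw [PySem.List.foldl_if_add_one (p := fun start_pos =>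
      (List.foldl (fun st _ => pvStepA c ((c.length : Nat) : Int) st) (start_pos, true)
        (PySem.List.pyRange 0 a 1)).2)]
    have hbody : ∀ i ∈ PySem.List.pyRange 0 ((c.length : Nat) : Int) 1, ∀ acc : Int,
        (if (PySem.List.pyGetD c i 0 == 0) = true then
          match (List.foldl (fun st i => pvStepB c ((c.length : Nat) : Int) st i)
              (PySem.Dict.empty, none)
              (PySem.List.pyRange (2 * ((c.length : Nat) : Int) - 1) (-1) (-1))).1.get? i with
          | none => acc + 1
          | some dv => if a < dv then acc + 1 else acc
        else acc) =
        (if (PySem.List.pyGetD c i 0 == 0 && pvBoolB c a i.toNat) = true then acc + 1 else acc) := by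
      intro i hi acc
      obtain ⟨hi0, hiN⟩ := (PySem.List.mem_pyRange_one).1 hi
      have hij : ((i.toNat : Nat) : Int) = i := Int.toNat_of_nonneg hi0
      have hjN : i.toNat < c.length := by omega
      rw [pv_fold_eq_proc c]
      rw [← hij]
      rw [pv_nxt_get c hN i.toNat hjN]
      cases hdo : pvDOpt c (i.toNat + 1) with
      | none =>
        have hbb : pvBoolB c a i.toNat = true := by simp [pvBoolB, hdo]
        simp only [Int.toNat_natCast, hbb, Bool.and_true]
        simp
      | some k =>
        have hbb : pvBoolB c a i.toNat = decide (a < (k : Int) + 1) := by simp [pvBoolB, hdo]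
        simp only [Option.map_some, Int.toNat_natCast]
        by_cases hak : a < (k : Int) + 1
        · have hbb' : pvBoolB c a i.toNat = true := by rw [hbb]; simp [hak]
          simp only [hbb', Bool.and_true]
          simp [Int.ofNat_eq_natCast, hak]
        · have hbb' : pvBoolB c a i.toNat = false := by rw [hbb]; simp [hak]
          simp only [hbb', Bool.and_false]
          simp [Int.ofNat_eq_natCast, hak]
    have hfold := PySem.List.foldl_congr_mem' _ _ _ (0 : Int) hbody
    rw [hfold]
    rw [PySem.List.foldl_if_add_one (p := fun i =>
      PySem.List.pyGetD c i 0 == 0 && pvBoolB c a i.toNat)]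
    rw [List.countP_filter]
    have hpq : ∀ x ∈ PySem.List.pyRange 0 ((c.length : Nat) : Int) 1,
        (((List.foldl (fun st _ => pvStepA c ((c.length : Nat) : Int) st) (x, true)
            (PySem.List.pyRange 0 a 1)).2 && (PySem.List.pyGetD c x 0 == 0)) = true ↔
         ((PySem.List.pyGetD c x 0 == 0 && pvBoolB c a x.toNat)) = true) := by
      intro x hx
      obtain ⟨hx0, hxN⟩ := (PySem.List.mem_pyRange_one).1 hx
      have hij : ((x.toNat : Nat) : Int) = x := Int.toNat_of_nonneg hx0
      have hjN : x.toNat < c.length := by omega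
      have hb : ((List.foldl (fun st _ => pvStepA c ((c.length : Nat) : Int) st) (x, true)
          (PySem.List.pyRange 0 a 1)).2) = pvBoolB c a x.toNat := by
        rw [← hij]
        exact pv_boolA_eq_boolB c a hN x.toNat hjN
      rw [hb, Bool.and_comm]
    rw [List.countP_congr hpq]
    rw [hcount, hzeros]
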